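-- pv_equiv track=rewrite | github.com/ucsils/primo_snippets | indexer.py | draft_index_content
-- ===== SOURCE A (Python) =====
-- def draft_index_content(index):
--     terms = sorted(index.keys())
--     text = '# Keyword Index\n'
--     letter = 'A'
--     while letter <= 'Z':
--         text += f'\n## --- {letter} ---\n'
--         while terms and terms[0][0] == letter:
--             term = terms.pop(0)
--             text += f'**{term}:**\n'
--             for path in index[term]:
--                 text += f'- [{path}]({path})\n'
--             else:
--                 text += '\n'
--         letter = chr(ord(letter)+1)
--     return text
-- ===== SOURCE B (Python) =====
-- def draft_index_content(index):
--     terms = sorted(index)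
--     kept = []
--     for t in terms:
--         if not ('A' <= t[0] <= 'Z'):
--             break
--         kept.append(t)
--     groups = {}
--     for t in kept:
--         groups.setdefault(t[0], []).append(t)
--     parts = ['# Keyword Index\n']
--     for k in range(26):
--         letter = chr(65 + k)
--         parts.append(f'\n## --- {letter} ---\n')
--         for t in groups.get(letter, []):
--             parts.append(f'**{t}:**\n'
--                          + ''.join(f'- [{p}]({p})\n' for p in index[t])
--                          + '\n')
--     return ''.join(parts)
-- ===== Notes on version B (the rewrite author's own statement) =====
-- stated objective: alternative
-- what changed: A repeatedly pops the sorted term list from the front inside a letter-driven while loop and grows the result by string +=; B takes the leading run of A-Z terms from the sorted list once (takewhile), buckets them into a dict keyed by first letter, and joins per-letter parts.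
import Mathlib
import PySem

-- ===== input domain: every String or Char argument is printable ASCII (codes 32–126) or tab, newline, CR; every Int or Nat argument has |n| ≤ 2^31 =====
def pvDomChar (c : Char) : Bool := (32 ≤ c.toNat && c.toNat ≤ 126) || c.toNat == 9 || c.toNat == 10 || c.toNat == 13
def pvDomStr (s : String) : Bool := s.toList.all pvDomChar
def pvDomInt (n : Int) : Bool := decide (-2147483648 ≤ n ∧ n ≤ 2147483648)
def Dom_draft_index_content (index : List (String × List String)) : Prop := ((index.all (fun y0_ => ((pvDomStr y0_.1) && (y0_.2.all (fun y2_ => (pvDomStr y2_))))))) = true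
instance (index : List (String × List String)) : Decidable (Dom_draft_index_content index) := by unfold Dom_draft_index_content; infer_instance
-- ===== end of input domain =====

-- B replaces A's per-letter pop(0) consumption and string += with sort → takewhile → bucket-by-first-letter dict → join;
-- equal return value on every input where A returns (Pre_ excludes the empty-string key, on which both raise IndexError).

-- ===== PORT A =====
-- f'\n## --- {letter} ---\n'
def pvAHeader (letter : Char) : List Char :=
  "\n## --- ".toList ++ [letter] ++ " ---\n".toList

-- the inner 'while terms and terms[0][0] == letter' loop: pops matching terms, extends text;
-- returns (text, remaining terms)
def pvAInner (d : PySem.Dict String (List String)) (letter : Char) :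
    List String → List Char → List Char × List String
  | [], text => (text, [])
  | t :: rest, text =>
    match t.toList with
    | [] => (text, t :: rest)   -- Python raises IndexError on terms[0][0]; excluded by Pre_
    | c :: _ =>
      if c = letter then
        let text1 := text ++ "**".toList ++ t.toList ++ ":**\n".toList
        -- for path in index[term]: text += f'- [{path}]({path})\n'  (term is a key, so d[term] is found)
        let text2 := (d.getD t []).foldl
          (fun acc p => acc ++ "- [".toList ++ p.toList ++ "](".toList ++ p.toList ++ ")\n".toList) text1
        pvAInner d letter rest (text2 ++ "\n".toList)
      else (text, t :: rest)

-- the outer 'while letter <= 'Z'' loop, letter as its code c (65..90)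
def pvAOuter (d : PySem.Dict String (List String)) (c : Nat)
    (terms : List String) (text : List Char) : List Char :=
  if c ≤ 90 then
    let r := pvAInner d (Char.ofNat c) terms (text ++ pvAHeader (Char.ofNat c))
    pvAOuter d (c + 1) r.2 r.1
  else text
termination_by 91 - c

def draft_index_content (index : List (String × List String)) : String :=
  let d := PySem.Dict.ofList index
  let terms := PySem.List.sorted d.keys (fun t => t)
  String.ofList (pvAOuter d 65 terms "# Keyword Index\n".toList)

-- ===== PORT B =====
-- f'\n## --- {letter} ---\n'
def pvBHeader (letter : Char) : List Char :=
  "\n## --- ".toList ++ [letter] ++ " ---\n".toList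

-- the 'for t in terms: if not ('A' <= t[0] <= 'Z'): break; kept.append(t)' loop
def pvBKept : List String → List String
  | [] => []
  | t :: rest =>
    match t.toList with
    | [] => []   -- Python raises IndexError on t[0]; excluded by Pre_
    | c :: _ => if 'A' ≤ c ∧ c ≤ 'Z' then t :: pvBKept rest else []

-- the 'for t in kept: groups.setdefault(t[0], []).append(t)' loop
-- (every t in kept is nonempty, so the headD default is never used on admitted inputs)
def pvBGroups (kept : List String) : PySem.Dict Char (List String) :=
  kept.foldl (fun g t => g.modify (t.toList.headD 'A') [] (fun l => l ++ [t])) PySem.Dict.empty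

-- f'**{t}:**\n' + ''.join(f'- [{p}]({p})\n' for p in index[t]) + '\n'
def pvBEntry (d : PySem.Dict String (List String)) (t : String) : List Char :=
  "**".toList ++ t.toList ++ ":**\n".toList
    ++ (d.getD t []).flatMap (fun p => "- [".toList ++ p.toList ++ "](".toList ++ p.toList ++ ")\n".toList)
    ++ "\n".toList

def draft_index_content_alt (index : List (String × List String)) : String :=
  let d := PySem.Dict.ofList index
  let terms := PySem.List.sorted d.keys (fun t => t)
  let kept := pvBKept terms
  let groups := pvBGroups kept
  let parts := (List.range 26).foldl
    (fun parts k =>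
      let letter := Char.ofNat (65 + k)
      let parts1 := parts ++ [pvBHeader letter]
      (groups.getD letter []).foldl (fun ps t => ps ++ [pvBEntry d t]) parts1)
    ["# Keyword Index\n".toList]
  String.ofList parts.flatten

-- ===== PRECONDITION & SPEC =====
-- Pre_ excludes an index containing the empty-string key: there A (terms[0][0]) raises IndexError (and B's t[0] does too).
def Pre_draft_index_content (index : List (String × List String)) : Prop :=
  ∀ p ∈ index, p.1 ≠ ""
instance (index : List (String × List String)) : Decidable (Pre_draft_index_content index) := by
  unfold Pre_draft_index_content; infer_instance

def pvWitness_draft_index_content : (List (String × List String)) :=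
  [("Apple", ["doc/a.md", "doc/b.md"]), ("Zebra", []), ("angle", ["x"])]

def Spec_draft_index_content (index : List (String × List String)) (out : String) : Prop :=
  out = draft_index_content_alt index
instance (index : List (String × List String)) (out : String) : Decidable (Spec_draft_index_content index out) := by
  unfold Spec_draft_index_content; infer_instance

-- ===== CLAIM (what is proved, stated in full; the proofs are below) =====
def Claim_equal_draft_index_content : Prop :=
  ∀ (index : List (String × List String)), Dom_draft_index_content index →
    Pre_draft_index_content index →
    Spec_draft_index_content index (draft_index_content index)

-- ===== LEMMAS AND PROOFS =====

-- first character of a term (terms handled here are nonempty, see Pre_)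
def pvHd (t : String) : Char := t.toList.headD 'A'

-- 'A' <= t[0] <= 'Z'
def pvUC (t : String) : Bool := decide ('A' ≤ pvHd t ∧ pvHd t ≤ 'Z')

-- the common reference shape: headers for letter codes c..c+n-1, each followed by the entries
-- of the kept terms whose first character is that letter
def pvRef (d : PySem.Dict String (List String)) (kept : List String) (c n : Nat) : List Char :=
  (List.range' c n).flatMap (fun code =>
    pvBHeader (Char.ofNat code) ++
      (kept.filter (fun t => pvHd t == Char.ofNat code)).flatMap (pvBEntry d))

theorem pv_char_le_iff (c d : Char) : c ≤ d ↔ c.toNat ≤ d.toNat := by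
  rw [Char.le_def, UInt32.le_iff_toNat_le]; rfl

theorem pv_char_lt_iff (c d : Char) : c < d ↔ c.toNat < d.toNat := by
  rw [Char.lt_def, UInt32.lt_iff_toNat_lt]; rfl

theorem pv_toNat_ofNat (n : Nat) (h : n ≤ 91) : (Char.ofNat n).toNat = n := by
  rw [Char.toNat_ofNat, if_pos (Or.inl (by omega))]

-- heads are monotone along string order (for nonempty strings)
theorem pv_hd_mono (s t : String) (hs : s.toList ≠ []) (ht : t.toList ≠ [])
    (h : s ≤ t) : pvHd s ≤ pvHd t := by
  rw [String.le_iff_toList_le] at h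
  unfold pvHd
  cases hs' : s.toList with
  | nil => exact absurd hs' hs
  | cons c u =>
    cases ht' : t.toList with
    | nil => exact absurd ht' ht
    | cons e v =>
      rw [hs', ht'] at h
      simp only [List.headD_cons]
      by_contra hc
      have hdc : e < c := lt_of_not_ge hc
      have : (e :: v) < (c :: u) := by rw [List.cons_lt_cons_iff]; exact Or.inl hdc
      exact absurd h (not_le.mpr this)

-- B's kept loop is takeWhile pvUC on a list of nonempty terms
theorem pv_kept_eq (ts : List String) (h : ∀ t ∈ ts, t.toList ≠ []) :
    pvBKept ts = ts.takeWhile pvUC := by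
  induction ts with
  | nil => rfl
  | cons t rest ih =>
    have hne := h t (List.mem_cons_self ..)
    rw [pvBKept]
    cases htl : t.toList with
    | nil => exact absurd htl hne
    | cons c u =>
      have hhd : pvHd t = c := by unfold pvHd; rw [htl]; rfl
      dsimp only
      rw [List.takeWhile_cons]
      by_cases huc : 'A' ≤ c ∧ c ≤ 'Z'
      · rw [if_pos huc]
        have : pvUC t = true := by unfold pvUC; rw [hhd]; exact decide_eq_true huc
        rw [this, if_pos rfl]
        rw [ih (fun x hx => h x (List.mem_cons_of_mem _ hx))]
      · rw [if_neg huc]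
        have : pvUC t = false := by unfold pvUC; rw [hhd]; exact decide_eq_false huc
        rw [this]; rfl

-- B's grouping dict looks up to a filter
theorem pv_groups_getD (kept : List String) (C : Char) :
    (pvBGroups kept).getD C [] = kept.filter (fun t => pvHd t == C) := by
  unfold pvBGroups
  have h1 : kept.foldl (fun g t => g.modify (t.toList.headD 'A') [] (fun l => l ++ [t])) PySem.Dict.empty
      = (kept.map (fun t => (pvHd t, t))).foldl (fun g p => g.modify p.1 [] (fun l => l ++ [p.2])) PySem.Dict.empty := by
    rw [List.foldl_map]; rfl
  rw [h1, PySem.Dict.getD_foldl_modify_append]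
  rw [List.filter_map, List.map_map]
  simp [PySem.Dict.getD_empty, Function.comp_def]

-- A's inner while loop renders the matching prefix and returns the rest
theorem pv_inner_eq (d : PySem.Dict String (List String)) (L : Char) (ts : List String)
    (h : ∀ t ∈ ts, t.toList ≠ []) : ∀ (text : List Char),
    pvAInner d L ts text =
      (text ++ (ts.takeWhile (fun t => pvHd t == L)).flatMap (pvBEntry d),
       ts.dropWhile (fun t => pvHd t == L)) := by
  induction ts with
  | nil => intro text; simp [pvAInner]
  | cons t rest ih =>
    intro text
    have hne := h t (List.mem_cons_self ..)
    rw [pvAInner]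
    cases htl : t.toList with
    | nil => exact absurd htl hne
    | cons c u =>
      have hhd : pvHd t = c := by unfold pvHd; rw [htl]; rfl
      dsimp only
      by_cases hc : c = L
      · rw [if_pos hc]
        rw [ih (fun x hx => h x (List.mem_cons_of_mem _ hx))]
        have hpred : (pvHd t == L) = true := by rw [hhd, hc]; exact beq_self_eq_true _
        rw [List.takeWhile_cons, hpred, List.dropWhile_cons, hpred]
        simp only [if_true]
        simp only [Prod.mk.injEq]
        refine ⟨?_, trivial⟩
        · simp only [List.append_assoc]
          rw [PySem.List.foldl_append_eq_flatMap]
          simp [pvBEntry, List.flatMap_cons, List.append_assoc, htl]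
      · rw [if_neg hc]
        have hpred : (pvHd t == L) = false := by rw [hhd]; exact beq_eq_false_iff_ne.mpr hc
        rw [List.takeWhile_cons, hpred, List.dropWhile_cons, hpred]
        simp

-- the matching prefix is exactly the kept terms with that head
theorem pv_takeWhile_eq_filter (ts : List String) (C : Char)
    (hC : 'A' ≤ C ∧ C ≤ 'Z')
    (hp : ts.Pairwise (fun a b => pvHd a ≤ pvHd b))
    (hb : ∀ t ∈ ts.takeWhile pvUC, C ≤ pvHd t) :
    ts.takeWhile (fun t => pvHd t == C) = (ts.takeWhile pvUC).filter (fun t => pvHd t == C) := by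
  induction ts with
  | nil => rfl
  | cons t rest ih =>
    rcases List.pairwise_cons.mp hp with ⟨hrel, hprest⟩
    by_cases ht : pvHd t = C
    · have huc : pvUC t = true := by unfold pvUC; rw [ht]; exact decide_eq_true hC
      have hpred : (pvHd t == C) = true := beq_iff_eq.mpr ht
      have hbrest : ∀ x ∈ rest.takeWhile pvUC, C ≤ pvHd x := by
        intro x hx
        exact hb x (by rw [List.takeWhile_cons, huc, if_pos rfl]; exact List.mem_cons_of_mem _ hx)
      rw [List.takeWhile_cons, hpred, List.takeWhile_cons, huc]
      simp only [if_true, List.filter_cons, hpred]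
      rw [ih hprest hbrest]
    · have hpred : (pvHd t == C) = false := beq_eq_false_iff_ne.mpr ht
      rw [List.takeWhile_cons, hpred]
      simp only [Bool.false_eq_true, if_false]
      symm
      rw [List.filter_eq_nil_iff]
      intro x hx
      rw [List.takeWhile_cons] at hx
      by_cases huc : pvUC t = true
      · rw [huc, if_pos rfl] at hx
        have htC : C < pvHd t := by
          have := hb t (by rw [List.takeWhile_cons, huc, if_pos rfl]; exact List.mem_cons_self ..)
          exact lt_of_le_of_ne this (Ne.symm ht)
        rcases List.mem_cons.mp hx with rfl | hx'
        · simp [hpred]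
        · have hxr : x ∈ rest := (List.takeWhile_sublist _).subset hx'
          have : C < pvHd x := lt_of_lt_of_le htC (hrel x hxr)
          simp [beq_eq_false_iff_ne.mpr (ne_of_gt this)]
      · simp only [Bool.not_eq_true] at huc
        rw [huc] at hx
        simp at hx

-- dropping the head-C prefix does not change later letters' groups
theorem pv_filter_drop (ts : List String) (C D : Char)
    (hC : 'A' ≤ C ∧ C ≤ 'Z') (hD : D ≠ C) :
    ((ts.dropWhile (fun t => pvHd t == C)).takeWhile pvUC).filter (fun t => pvHd t == D)
      = (ts.takeWhile pvUC).filter (fun t => pvHd t == D) := by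
  induction ts with
  | nil => rfl
  | cons t rest ih =>
    by_cases ht : pvHd t = C
    · have huc : pvUC t = true := by unfold pvUC; rw [ht]; exact decide_eq_true hC
      have hpred : (pvHd t == C) = true := beq_iff_eq.mpr ht
      have hpd : (pvHd t == D) = false := beq_eq_false_iff_ne.mpr (by rw [ht]; exact fun h => hD h.symm)
      rw [List.dropWhile_cons, hpred]
      simp only [if_true]
      rw [ih, List.takeWhile_cons, huc]
      simp [hpd]
    · have hpred : (pvHd t == C) = false := beq_eq_false_iff_ne.mpr ht
      rw [List.dropWhile_cons, hpred]
      simp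

-- after dropping the head-C prefix, all kept heads exceed C
theorem pv_bound_drop (ts : List String) (C : Char)
    (hC : 'A' ≤ C ∧ C ≤ 'Z')
    (hp : ts.Pairwise (fun a b => pvHd a ≤ pvHd b))
    (hb : ∀ t ∈ ts.takeWhile pvUC, C ≤ pvHd t) :
    ∀ t ∈ (ts.dropWhile (fun t => pvHd t == C)).takeWhile pvUC, C < pvHd t := by
  induction ts with
  | nil => intro t ht; simp at ht
  | cons t rest ih =>
    rcases List.pairwise_cons.mp hp with ⟨hrel, hprest⟩
    by_cases ht : pvHd t = C
    · have huc : pvUC t = true := by unfold pvUC; rw [ht]; exact decide_eq_true hC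
      have hpred : (pvHd t == C) = true := beq_iff_eq.mpr ht
      have hbrest : ∀ x ∈ rest.takeWhile pvUC, C ≤ pvHd x := by
        intro x hx
        exact hb x (by rw [List.takeWhile_cons, huc, if_pos rfl]; exact List.mem_cons_of_mem _ hx)
      rw [List.dropWhile_cons, hpred]
      simp only [if_true]
      exact ih hprest hbrest
    · have hpred : (pvHd t == C) = false := beq_eq_false_iff_ne.mpr ht
      rw [List.dropWhile_cons, hpred]
      simp only [Bool.false_eq_true, if_false]
      intro x hx
      rw [List.takeWhile_cons] at hx
      by_cases huc : pvUC t = true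
      · rw [huc, if_pos rfl] at hx
        have htC : C < pvHd t := by
          have := hb t (by rw [List.takeWhile_cons, huc, if_pos rfl]; exact List.mem_cons_self ..)
          exact lt_of_le_of_ne this (Ne.symm ht)
        rcases List.mem_cons.mp hx with rfl | hx'
        · exact htC
        · exact lt_of_lt_of_le htC (hrel x ((List.takeWhile_sublist _).subset hx'))
      · simp only [Bool.not_eq_true] at huc
        rw [huc] at hx
        simp at hx

theorem pv_flatten_flatMap {α β : Type} (l : List α) (G : α → List (List β)) :
    (l.flatMap G).flatten = l.flatMap (fun x => (G x).flatten) := by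
  induction l with
  | nil => simp
  | cons x xs ih => simp [List.flatMap_cons, List.flatten_append, ih]

theorem pvRef_succ (d : PySem.Dict String (List String)) (kept : List String) (c n : Nat) :
    pvRef d kept c (n+1) =
      pvBHeader (Char.ofNat c)
        ++ (kept.filter (fun t => pvHd t == Char.ofNat c)).flatMap (pvBEntry d)
        ++ pvRef d kept (c+1) n := by
  unfold pvRef
  rw [List.range'_succ, List.flatMap_cons, List.append_assoc]

-- A's outer loop equals the reference rendering of the kept terms
theorem pv_outer_eq (d : PySem.Dict String (List String)) :
    ∀ (n c : Nat), c + n = 91 → 65 ≤ c → ∀ (ts : List String) (text : List Char),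
    (∀ t ∈ ts, t.toList ≠ []) →
    ts.Pairwise (fun a b => pvHd a ≤ pvHd b) →
    (∀ t ∈ ts.takeWhile pvUC, Char.ofNat c ≤ pvHd t) →
    pvAOuter d c ts text = text ++ pvRef d (ts.takeWhile pvUC) c n := by
  intro n
  induction n with
  | zero =>
    intro c hc _ ts text _ _ _
    rw [pvAOuter, if_neg (by omega)]
    simp [pvRef]
  | succ n ih =>
    intro c hc hc65 ts text hne hp hb
    have hc90 : c ≤ 90 := by omega
    have hCuc : 'A' ≤ Char.ofNat c ∧ Char.ofNat c ≤ 'Z' := by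
      constructor
      · rw [pv_char_le_iff, pv_toNat_ofNat c (by omega)]
        exact le_of_eq_of_le (by decide) hc65
      · rw [pv_char_le_iff, pv_toNat_ofNat c (by omega)]
        exact le_of_le_of_eq hc90 (by decide)
    rw [pvAOuter, if_pos hc90]
    simp only
    rw [pv_inner_eq d (Char.ofNat c) ts hne]
    dsimp only
    -- the recursive call on the dropped list
    rw [ih (c+1) (by omega) (by omega)
        (ts.dropWhile (fun t => pvHd t == Char.ofNat c)) _
        (fun x hx => hne x ((List.dropWhile_sublist _).subset hx))
        (List.Pairwise.sublist (List.dropWhile_sublist _) hp)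
        (by
          intro x hx
          have hlt := pv_bound_drop ts (Char.ofNat c) hCuc hp hb x hx
          rw [pv_char_lt_iff, pv_toNat_ofNat c (by omega)] at hlt
          rw [pv_char_le_iff, pv_toNat_ofNat (c+1) (by omega)]
          omega)]
    -- unfold one step of the reference
    conv_rhs => rw [pvRef_succ]
    have h1 : ts.takeWhile (fun t => pvHd t == Char.ofNat c)
        = (ts.takeWhile pvUC).filter (fun t => pvHd t == Char.ofNat c) :=
      pv_takeWhile_eq_filter ts (Char.ofNat c) hCuc hp hb
    have h2 : pvRef d ((ts.dropWhile (fun t => pvHd t == Char.ofNat c)).takeWhile pvUC) (c+1) n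
        = pvRef d (ts.takeWhile pvUC) (c+1) n := by
      unfold pvRef
      rw [List.flatMap_def, List.flatMap_def]
      congr 1
      apply List.map_congr_left
      intro code hcode
      rw [List.mem_range'_1] at hcode
      have hDC : Char.ofNat code ≠ Char.ofNat c := by
        intro h
        have := congrArg Char.toNat h
        rw [pv_toNat_ofNat code (by omega), pv_toNat_ofNat c (by omega)] at this
        omega
      rw [pv_filter_drop ts (Char.ofNat c) (Char.ofNat code) hCuc hDC]
    rw [h2, h1]
    simp [pvAHeader, pvBHeader, List.append_assoc]

-- B unfolded to the reference shape
theorem pv_alt_eq (index : List (String × List String)) :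
    draft_index_content_alt index =
      String.ofList ("# Keyword Index\n".toList ++
        pvRef (PySem.Dict.ofList index)
          (pvBKept (PySem.List.sorted (PySem.Dict.ofList index).keys (fun t => t))) 65 26) := by
  simp only [draft_index_content_alt]
  set d := PySem.Dict.ofList index with hd
  set kept := pvBKept (PySem.List.sorted d.keys (fun t => t)) with hkept
  congr 1
  have hstep : (List.range 26).foldl
        (fun parts k =>
          List.foldl (fun ps t => ps ++ [pvBEntry d t]) (parts ++ [pvBHeader (Char.ofNat (65 + k))])
            ((pvBGroups kept).getD (Char.ofNat (65 + k)) []))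
        ["# Keyword Index\n".toList]
      = (List.range 26).foldl
        (fun parts k => parts ++ ([pvBHeader (Char.ofNat (65+k))]
          ++ ((pvBGroups kept).getD (Char.ofNat (65+k)) []).map (pvBEntry d)))
        ["# Keyword Index\n".toList] := by
    apply PySem.List.foldl_congr_mem
    intro acc k _
    rw [PySem.List.foldl_append_singleton_eq_map, List.append_assoc]
  rw [hstep]
  rw [PySem.List.foldl_append_eq_flatMap]
  rw [List.flatten_append, pv_flatten_flatMap]
  have hbody : ∀ k, ([pvBHeader (Char.ofNat (65+k))]
        ++ ((pvBGroups kept).getD (Char.ofNat (65+k)) []).map (pvBEntry d)).flatten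
      = pvBHeader (Char.ofNat (65+k))
        ++ (kept.filter (fun t => pvHd t == Char.ofNat (65+k))).flatMap (pvBEntry d) := by
    intro k
    rw [pv_groups_getD]
    simp [List.flatMap_def]
  have href : pvRef d kept 65 26
      = (List.range 26).flatMap (fun k =>
          pvBHeader (Char.ofNat (65+k))
            ++ (kept.filter (fun t => pvHd t == Char.ofNat (65+k))).flatMap (pvBEntry d)) := by
    unfold pvRef
    rw [List.range'_eq_map_range, List.flatMap_map]
  rw [href]
  have hcong : (List.range 26).flatMap (fun k => ([pvBHeader (Char.ofNat (65+k))]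
        ++ ((pvBGroups kept).getD (Char.ofNat (65+k)) []).map (pvBEntry d)).flatten)
      = (List.range 26).flatMap (fun k =>
          pvBHeader (Char.ofNat (65+k))
            ++ (kept.filter (fun t => pvHd t == Char.ofNat (65+k))).flatMap (pvBEntry d)) := by
    rw [List.flatMap_def, List.flatMap_def]
    congr 1
    exact List.map_congr_left (fun k _ => hbody k)
  rw [hcong]
  simp

-- ===== VERDICT (by name: the statement is the Claim_ definition above) =====
theorem draft_index_content_spec : Claim_equal_draft_index_content := by
  intro index _ hpre
  unfold Spec_draft_index_content
  rw [pv_alt_eq]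
  simp only [draft_index_content]
  set d := PySem.Dict.ofList index with hd
  set terms := PySem.List.sorted d.keys (fun t => t) with hterms
  have hk : d.keys = PySem.Set.ofList (index.map (fun p => p.1)) := by
    have hofl : d = index.foldl (fun g p => g.insert p.1 p.2) PySem.Dict.empty := rfl
    rw [hofl, PySem.Dict.keys_foldl_insert_key index (fun p => p.1) (fun g p => p.2)]
    rw [PySem.Dict.keys_empty, PySem.Set.update_nil_left]
  have hne : ∀ t ∈ terms, t.toList ≠ [] := by
    intro t ht
    have h1 : t ∈ d.keys := (PySem.List.mem_sorted _ _ _ _).mp ht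
    rw [hk] at h1
    have h2 : t ∈ index.map (fun p => p.1) := (PySem.Set.mem_ofList _ _).mp h1
    rcases List.mem_map.mp h2 with ⟨p, hp, rfl⟩
    rw [ne_eq, String.toList_eq_nil_iff]
    exact hpre p hp
  have hp : terms.Pairwise (fun a b => pvHd a ≤ pvHd b) := by
    have h0 : terms.Pairwise (fun a b => a ≤ b) := PySem.List.sorted_pairwise _ _
    exact h0.imp_of_mem (fun ha hb h => pv_hd_mono _ _ (hne _ ha) (hne _ hb) h)
  have hb : ∀ t ∈ terms.takeWhile pvUC, Char.ofNat 65 ≤ pvHd t := by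
    intro t ht
    have h1 := List.mem_takeWhile_imp ht
    unfold pvUC at h1
    have h2 := of_decide_eq_true h1
    have h3 : Char.ofNat 65 = 'A' := by decide
    rw [h3]
    exact h2.1
  rw [pv_outer_eq d 26 65 rfl (by omega) terms _ hne hp hb]
  rw [pv_kept_eq terms hne]
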